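-- pv_equiv track=rewrite | github.com/aalm1233/lolita | replace_icons2.py | parse_icon_args
-- ===== SOURCE A (Python) =====
-- def parse_icon_args(inner, matched_icon):
--     """Parse the args after the icon reference in an Icon() call."""
--     rest = inner.replace(matched_icon, '', 1).strip()
--     if rest.startswith(','):
--         rest = rest[1:].strip()
--
--     # Split by top-level commas
--     args = []
--     current = []
--     depth = 0
--     for ch in rest:
--         if ch in '({':
--             depth += 1
--             current.append(ch)
--         elif ch in ')}':
--             depth -= 1
--             current.append(ch)
--         elif ch == ',' and depth == 0:
--             args.append(''.join(current).strip())
--             current = []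
--         else:
--             current.append(ch)
--     if current:
--         last = ''.join(current).strip()
--         if last:
--             args.append(last)
--
--     modifier_val = None
--     tint_val = None
--     pos_idx = 0
--
--     for arg in args:
--         stripped = arg.strip()
--         if '=' in stripped and not stripped.startswith('Modifier'):
--             name = stripped.split('=', 1)[0].strip()
--             val = stripped.split('=', 1)[1].strip()
--             if name == 'modifier':
--                 modifier_val = val
--             elif name == 'tint':
--                 tint_val = val
--         else:
--             if pos_idx == 0:
--                 pass  # contentDescription
--             elif pos_idx == 1:
--                 if modifier_val is None:
--                     modifier_val = stripped
--             elif pos_idx == 2: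
--                 if tint_val is None:
--                     tint_val = stripped
--             pos_idx += 1
--
--     return modifier_val, tint_val
-- ===== SOURCE B (Python) =====
-- def parse_icon_args(inner, matched_icon):
--     """Parse the args after the icon reference in an Icon() call."""
--     rest = inner.replace(matched_icon, '', 1).strip()
--     if rest.startswith(','):
--         rest = rest[1:].strip()
--
--     # Phase 1: split by top-level commas (single pass, same as before)
--     args = []
--     current = []
--     depth = 0
--     for ch in rest:
--         if ch in '({':
--             depth += 1
--             current.append(ch)
--         elif ch in ')}':
--             depth -= 1
--             current.append(ch)
--         elif ch == ',' and depth == 0: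
--             args.append(''.join(current).strip())
--             current = []
--         else:
--             current.append(ch)
--     if current:
--         last = ''.join(current).strip()
--         if last:
--             args.append(last)
--
--     # Phase 2: partition into keyword dict (later entries overwrite) and
--     # an ordered positional list, then look the answers up directly.
--     kw = {}
--     pos = []
--     for arg in args:
--         s = arg.strip()
--         if '=' in s and not s.startswith('Modifier'):
--             name, val = s.split('=', 1)
--             kw[name.strip()] = val.strip()
--         else:
--             pos.append(s)
--
--     modifier_val = kw['modifier'] if 'modifier' in kw else (pos[1] if len(pos) > 1 else None)
--     tint_val = kw['tint'] if 'tint' in kw else (pos[2] if len(pos) > 2 else None)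
--     return modifier_val, tint_val
-- ===== Notes on version B (the rewrite author's own statement) =====
-- stated objective: alternative
-- what changed: The second phase's single stateful loop (running pos_idx with conditional fill of modifier/tint) is replaced by an explicit partition of the args into a keyword dict (later entries overwriting) and an ordered positional list, after which modifier and tint are computed by direct dict/list lookups.
import Mathlib
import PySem

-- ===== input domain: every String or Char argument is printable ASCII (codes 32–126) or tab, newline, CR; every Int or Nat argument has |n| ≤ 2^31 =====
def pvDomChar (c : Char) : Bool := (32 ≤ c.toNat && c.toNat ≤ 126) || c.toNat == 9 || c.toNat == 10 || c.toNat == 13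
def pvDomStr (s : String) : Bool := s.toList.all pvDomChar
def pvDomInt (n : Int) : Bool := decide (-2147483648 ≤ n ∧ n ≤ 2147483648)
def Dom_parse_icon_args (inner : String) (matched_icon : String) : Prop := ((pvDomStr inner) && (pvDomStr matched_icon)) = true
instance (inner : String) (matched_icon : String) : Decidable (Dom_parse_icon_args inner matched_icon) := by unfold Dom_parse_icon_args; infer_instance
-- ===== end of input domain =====

-- B replaces A's running pos_idx/conditional-set loop by an explicit partition into a
-- keyword dict and a positional list followed by direct lookups (objective: alternative decomposition).


-- ===== SHARED PHASE-1 HELPERS (identical in both Python sources: rest computation and the top-level comma splitter) =====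

-- s.replace(old, '', 1): remove the first occurrence of old (exact: Python's find-based first-occurrence removal; old = '' leaves s unchanged, as in CPython)
def pvReplaceFirst (s old : List Char) : List Char :=
  let i := PySem.Chars.find s old
  if i = -1 then s else s.take i.toNat ++ s.drop (i.toNat + old.length)

def pvRestOf (inner matched_icon : String) : List Char :=
  let rest := PySem.Chars.strip (pvReplaceFirst inner.toList matched_icon.toList)
  if PySem.Chars.startswith rest [','] then PySem.Chars.strip (PySem.Chars.slice rest (some 1) none) else rest

def pvSplitStep (st : List (List Char) × List Char × Int) (ch : Char) : List (List Char) × List Char × Int :=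
  if ch = '(' ∨ ch = '{' then (st.1, st.2.1 ++ [ch], st.2.2 + 1)
  else if ch = ')' ∨ ch = '}' then (st.1, st.2.1 ++ [ch], st.2.2 - 1)
  else if ch = ',' ∧ st.2.2 = 0 then (st.1 ++ [PySem.Chars.strip st.2.1], [], st.2.2)
  else (st.1, st.2.1 ++ [ch], st.2.2)

def pvSplitArgs (rest : List Char) : List (List Char) :=
  let st := rest.foldl pvSplitStep ([], [], 0)
  if st.2.1 ≠ [] then
    (if PySem.Chars.strip st.2.1 ≠ [] then st.1 ++ [PySem.Chars.strip st.2.1] else st.1)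
  else st.1

-- '=' in s and not s.startswith('Modifier')
def pvIsKw (s : List Char) : Bool :=
  PySem.Chars.isIn ['='] s && !(PySem.Chars.startswith s "Modifier".toList)

-- s.split('=', 1)[0].strip() / [1].strip()
def pvName (s : List Char) : List Char := PySem.Chars.strip ((PySem.Chars.splitOnMax s ['='] 1).getD 0 [])
def pvVal (s : List Char) : List Char := PySem.Chars.strip ((PySem.Chars.splitOnMax s ['='] 1).getD 1 [])

-- ===== PORT A =====

-- A's second phase: one loop carrying (modifier_val, tint_val, pos_idx)
def pvLoopA : List (List Char) → Option (List Char) → Option (List Char) → Int → Option (List Char) × Option (List Char)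
  | [], m, t, _ => (m, t)
  | a :: rest, m, t, p =>
    let s := PySem.Chars.strip a
    if pvIsKw s then
      if pvName s = "modifier".toList then pvLoopA rest (some (pvVal s)) t p
      else if pvName s = "tint".toList then pvLoopA rest m (some (pvVal s)) p
      else pvLoopA rest m t p
    else
      if p = 0 then pvLoopA rest m t (p + 1)
      else if p = 1 then pvLoopA rest (if m = none then some s else m) t (p + 1)
      else if p = 2 then pvLoopA rest m (if t = none then some s else t) (p + 1)
      else pvLoopA rest m t (p + 1)

def parse_icon_args (inner : String) (matched_icon : String) : Option String × Option String :=
  let r := pvLoopA (pvSplitArgs (pvRestOf inner matched_icon)) none none 0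
  (r.1.map String.ofList, r.2.map String.ofList)

-- ===== PORT B =====

-- B's second phase: partition args into a keyword dict (later entries overwrite) and a positional list
def pvClassifyStep (st : PySem.Dict (List Char) (List Char) × List (List Char)) (a : List Char) :
    PySem.Dict (List Char) (List Char) × List (List Char) :=
  let s := PySem.Chars.strip a
  if pvIsKw s then (st.1.insert (pvName s) (pvVal s), st.2)
  else (st.1, st.2 ++ [s])

def parse_icon_args_alt (inner : String) (matched_icon : String) : Option String × Option String :=
  let args := pvSplitArgs (pvRestOf inner matched_icon)
  let c := args.foldl pvClassifyStep (PySem.Dict.empty, [])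
  let m : Option (List Char) := match c.1.get? "modifier".toList with
    | some v => some v
    | none => c.2[1]?
  let t : Option (List Char) := match c.1.get? "tint".toList with
    | some v => some v
    | none => c.2[2]?
  (m.map String.ofList, t.map String.ofList)

-- ===== PRECONDITION & SPEC =====
def Spec_parse_icon_args (inner : String) (matched_icon : String) (out : Option String × Option String) : Prop := out = parse_icon_args_alt inner matched_icon
instance (inner : String) (matched_icon : String) (out : Option String × Option String) : Decidable (Spec_parse_icon_args inner matched_icon out) := by unfold Spec_parse_icon_args; infer_instance

-- ===== CLAIM (what is proved, stated in full; the proofs are below) =====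
def Claim_equal_parse_icon_args : Prop := ∀ (inner : String) (matched_icon : String), Dom_parse_icon_args inner matched_icon → Spec_parse_icon_args inner matched_icon (parse_icon_args inner matched_icon)

-- ===== LEMMAS AND PROOFS =====

-- last keyword value for name n among args (keywords always win; later entries overwrite)
def pvKStep (n : List Char) (acc : Option (List Char)) (a : List Char) : Option (List Char) :=
  let s := PySem.Chars.strip a
  if pvIsKw s ∧ pvName s = n then some (pvVal s) else acc

def pvK (args : List (List Char)) (n : List Char) : Option (List Char) :=
  args.foldl (pvKStep n) none

-- the stripped positional (non-keyword) args, in order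
def pvPStep (acc : List (List Char)) (a : List Char) : List (List Char) :=
  let s := PySem.Chars.strip a
  if pvIsKw s then acc else acc ++ [s]

def pvP (args : List (List Char)) : List (List Char) :=
  args.foldl pvPStep []

-- the positional value A's loop can still assign to slot i when pos_idx starts at p
def pvPos (args : List (List Char)) (p : Int) (i : Nat) : Option (List Char) :=
  if p ≤ (i : Int) then (pvP args)[((i : Int) - p).toNat]? else none

theorem pvK_acc (args : List (List Char)) : ∀ (acc : Option (List Char)) (n : List Char),
    List.foldl (pvKStep n) acc args = (pvK args n).or acc := by
  induction args with
  | nil => intro acc n; simp [pvK]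
  | cons a rest ih =>
    intro acc n
    have h2 : pvK (a :: rest) n = (pvK rest n).or (pvKStep n none a) := by
      show List.foldl (pvKStep n) (pvKStep n none a) rest = _
      rw [ih]
    rw [List.foldl_cons, ih, h2]
    cases pvK rest n <;> simp [pvKStep] <;> split <;> simp

theorem pvP_acc (args : List (List Char)) : ∀ (acc : List (List Char)),
    List.foldl pvPStep acc args = acc ++ pvP args := by
  induction args with
  | nil => intro acc; simp [pvP]
  | cons a rest ih =>
    intro acc
    have h2 : pvP (a :: rest) = pvPStep [] a ++ pvP rest := by
      show List.foldl pvPStep (pvPStep [] a) rest = _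
      rw [ih]
    rw [List.foldl_cons, ih, h2]
    simp only [pvPStep]
    split <;> simp

theorem pvK_cons (a : List Char) (rest : List (List Char)) (n : List Char) :
    pvK (a :: rest) n =
      (pvK rest n).or (if pvIsKw (PySem.Chars.strip a) ∧ pvName (PySem.Chars.strip a) = n
        then some (pvVal (PySem.Chars.strip a)) else none) := by
  show List.foldl (pvKStep n) (pvKStep n none a) rest = _
  rw [pvK_acc]
  simp [pvKStep]

theorem pvP_cons (a : List Char) (rest : List (List Char)) :
    pvP (a :: rest) =
      (if pvIsKw (PySem.Chars.strip a) then pvP rest else PySem.Chars.strip a :: pvP rest) := by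
  show List.foldl pvPStep (pvPStep [] a) rest = _
  rw [pvP_acc]
  simp only [pvPStep]
  split <;> simp

theorem classify_fst_get? (args : List (List Char)) :
    ∀ (d : PySem.Dict (List Char) (List Char)) (ps : List (List Char)) (n : List Char),
    ((args.foldl pvClassifyStep (d, ps)).1).get? n = (pvK args n).or (d.get? n) := by
  induction args with
  | nil => intro d ps n; simp [pvK]
  | cons a rest ih =>
    intro d ps n
    rw [List.foldl_cons, pvK_cons]
    by_cases h : pvIsKw (PySem.Chars.strip a)
    · rw [show pvClassifyStep (d, ps) a
          = (d.insert (pvName (PySem.Chars.strip a)) (pvVal (PySem.Chars.strip a)), ps) by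
        simp [pvClassifyStep, h]]
      rw [ih, PySem.Dict.get?_insert]
      by_cases hn : n = pvName (PySem.Chars.strip a)
      · cases pvK rest n <;> simp [h, hn]
      · have hne : pvName (PySem.Chars.strip a) ≠ n := fun e => hn (Eq.symm e)
        cases pvK rest n <;> simp [h, hn, hne]
    · rw [show pvClassifyStep (d, ps) a = (d, ps ++ [PySem.Chars.strip a]) by
        simp [pvClassifyStep, h]]
      rw [ih]
      simp [h]

theorem classify_snd (args : List (List Char)) :
    ∀ (d : PySem.Dict (List Char) (List Char)) (ps : List (List Char)),
    (args.foldl pvClassifyStep (d, ps)).2 = ps ++ pvP args := by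
  induction args with
  | nil => intro d ps; simp [pvP]
  | cons a rest ih =>
    intro d ps
    rw [List.foldl_cons, pvP_cons]
    by_cases h : pvIsKw (PySem.Chars.strip a)
    · rw [show pvClassifyStep (d, ps) a
          = (d.insert (pvName (PySem.Chars.strip a)) (pvVal (PySem.Chars.strip a)), ps) by
        simp [pvClassifyStep, h]]
      rw [ih]
      simp [h]
    · rw [show pvClassifyStep (d, ps) a = (d, ps ++ [PySem.Chars.strip a]) by
        simp [pvClassifyStep, h]]
      rw [ih]
      simp [h]

theorem loopA_eq (args : List (List Char)) : ∀ (m t : Option (List Char)) (p : Int), 0 ≤ p →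
    pvLoopA args m t p =
      ( (pvK args "modifier".toList).or (m.or (pvPos args p 1)),
        (pvK args "tint".toList).or (t.or (pvPos args p 2)) ) := by
  induction args with
  | nil =>
    intro m t p hp
    simp only [pvLoopA, pvK, pvP, pvPos, List.foldl_nil]
    cases m <;> cases t <;> simp
  | cons a rest ih =>
    intro m t p hp
    simp only [pvLoopA]
    rw [pvK_cons, pvK_cons]
    by_cases hkw : pvIsKw (PySem.Chars.strip a)
    · have hPk : pvP (a :: rest) = pvP rest := by rw [pvP_cons, if_pos hkw]
      have pos_eq : ∀ i : Nat, pvPos (a :: rest) p i = pvPos rest p i := by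
        intro i; unfold pvPos; rw [hPk]
      rw [if_pos hkw, pos_eq 1, pos_eq 2]
      by_cases hm : pvName (PySem.Chars.strip a) = "modifier".toList
      · have hnt : pvName (PySem.Chars.strip a) ≠ "tint".toList := by rw [hm]; decide
        have hcT : ¬ (pvIsKw (PySem.Chars.strip a) = true ∧
            pvName (PySem.Chars.strip a) = "tint".toList) := fun hc => hnt hc.2
        rw [if_pos hm, ih _ _ _ hp, if_pos ⟨hkw, hm⟩, if_neg hcT, Option.or_none]
        cases pvK rest "modifier".toList <;> simp
      · have hcM : ¬ (pvIsKw (PySem.Chars.strip a) = true ∧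
            pvName (PySem.Chars.strip a) = "modifier".toList) := fun hc => hm hc.2
        rw [if_neg hm, if_neg hcM, Option.or_none]
        by_cases ht : pvName (PySem.Chars.strip a) = "tint".toList
        · rw [if_pos ht, ih _ _ _ hp, if_pos ⟨hkw, ht⟩]
          cases pvK rest "tint".toList <;> simp
        · have hcT : ¬ (pvIsKw (PySem.Chars.strip a) = true ∧
              pvName (PySem.Chars.strip a) = "tint".toList) := fun hc => ht hc.2
          rw [if_neg ht, ih _ _ _ hp, if_neg hcT, Option.or_none]
    · have hPc : pvP (a :: rest) = PySem.Chars.strip a :: pvP rest := by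
        rw [pvP_cons, if_neg hkw]
      have posAt : ∀ i : Nat, p = (i : Int) →
          pvPos (a :: rest) p i = some (PySem.Chars.strip a) := by
        intro i h
        unfold pvPos
        rw [if_pos (le_of_eq h), hPc, show ((i : Int) - p).toNat = 0 by omega]
        simp
      have posShift : ∀ i : Nat, p < (i : Int) →
          pvPos (a :: rest) p i = pvPos rest (p + 1) i := by
        intro i h
        unfold pvPos
        rw [if_pos (le_of_lt h), if_pos (by omega), hPc,
          show ((i : Int) - p).toNat = ((i : Int) - (p + 1)).toNat + 1 by omega]
        simp
      have posGone : ∀ i : Nat, (i : Int) < p → pvPos (a :: rest) p i = none := by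
        intro i h; unfold pvPos; rw [if_neg (by omega)]
      have posGone' : ∀ i : Nat, (i : Int) < p + 1 → pvPos rest (p + 1) i = none := by
        intro i h; unfold pvPos; rw [if_neg (by omega)]
      have hcM : ¬ (pvIsKw (PySem.Chars.strip a) = true ∧
          pvName (PySem.Chars.strip a) = "modifier".toList) := fun hc => hkw hc.1
      have hcT : ¬ (pvIsKw (PySem.Chars.strip a) = true ∧
          pvName (PySem.Chars.strip a) = "tint".toList) := fun hc => hkw hc.1
      rw [if_neg hkw, if_neg hcM, if_neg hcT, Option.or_none, Option.or_none]
      by_cases hp0 : p = 0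
      · rw [if_pos hp0, ih _ _ _ (by omega),
          posShift 1 (by omega), posShift 2 (by omega)]
      · rw [if_neg hp0]
        by_cases hp1 : p = 1
        · rw [if_pos hp1, ih _ _ _ (by omega), posShift 2 (by omega), posAt 1 (by omega),
            posGone' 1 (by omega)]
          cases m <;> simp
        · rw [if_neg hp1]
          by_cases hp2 : p = 2
          · rw [if_pos hp2, ih _ _ _ (by omega), posAt 2 (by omega), posGone 1 (by omega),
              posGone' 1 (by omega), posGone' 2 (by omega)]
            cases t <;> simp
          · rw [if_neg hp2, ih _ _ _ (by omega), posGone 1 (by omega), posGone 2 (by omega),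
              posGone' 1 (by omega), posGone' 2 (by omega)]

-- ===== VERDICT (by name: the statement is the Claim_ definition above) =====
theorem parse_icon_args_spec : Claim_equal_parse_icon_args := by
  intro inner matched_icon _
  unfold Spec_parse_icon_args
  simp only [parse_icon_args, parse_icon_args_alt]
  rw [loopA_eq _ none none 0 (by omega)]
  rw [classify_fst_get?, classify_fst_get?, classify_snd]
  simp only [PySem.Dict.get?_empty, Option.or_none, List.nil_append]
  have h1 : ∀ args, pvPos args 0 1 = (pvP args)[1]? := by intro args; simp [pvPos]
  have h2 : ∀ args, pvPos args 0 2 = (pvP args)[2]? := by intro args; simp [pvPos]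
  rw [h1, h2]
  cases pvK (pvSplitArgs (pvRestOf inner matched_icon)) "modifier".toList <;>
    cases pvK (pvSplitArgs (pvRestOf inner matched_icon)) "tint".toList <;> simp
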